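-- pv_equiv track=rewrite | github.com/openai/parameter-golf | scripts/decision_chart.py | is_baseline
-- ===== SOURCE A (Python) =====
-- LOCKED_KEYS = {
--     "QK_GAIN_INIT": "5.5",
--     "WARMDOWN_FRAC": "0.64",
--     "TTT_ENABLED": "1",
--     "SLIDING_WINDOW_ENABLED": "1",
--     "TTT_EPOCHS": "1",
--     "EMA_DECAY": "0.995",
--     "LOGIT_SOFTCAP": "20",
-- }
--
-- def knob_delta_from_locked(overrides: dict[str, str]) -> dict[str, str]:
--     """Return overrides that differ from locked baseline."""
--     return {
--         k: v
--         for k, v in overrides.items()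
--         if LOCKED_KEYS.get(k) != v and k not in ("SEED", "ITERATIONS", "TIMEOUT_SECS", "MAX_WALLCLOCK_SECONDS", "FAST_SMOKE")
--     }
--
-- def is_baseline(overrides: dict[str, str]) -> bool:
--     """A run is baseline if every locked key matches and there's no extra knob."""
--     extras = knob_delta_from_locked(overrides)
--     if extras:
--         return False
--     for k, v in LOCKED_KEYS.items():
--         if overrides.get(k) != v:
--             return False
--     return True
-- ===== SOURCE B (Python) =====
-- LOCKED_KEYS = {
--     "QK_GAIN_INIT": "5.5",
--     "WARMDOWN_FRAC": "0.64",
--     "TTT_ENABLED": "1",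
--     "SLIDING_WINDOW_ENABLED": "1",
--     "TTT_EPOCHS": "1",
--     "EMA_DECAY": "0.995",
--     "LOGIT_SOFTCAP": "20",
-- }
--
-- _IGNORED = {"SEED", "ITERATIONS", "TIMEOUT_SECS", "MAX_WALLCLOCK_SECONDS", "FAST_SMOKE"}
--
-- def is_baseline(overrides: dict[str, str]) -> bool:
--     """A run is baseline iff the non-ignored overrides are exactly the locked items."""
--     return {(k, v) for k, v in overrides.items() if k not in _IGNORED} == set(LOCKED_KEYS.items())
-- ===== Notes on version B (the rewrite author's own statement) =====
-- stated objective: idiomatic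
-- what changed: Replaces A's two-stage check (materialize a filtered delta dict, test its truthiness, then loop over the locked keys with get) by a single set equality between the non-ignored override (key,value) pairs and the locked items.
import Mathlib
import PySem

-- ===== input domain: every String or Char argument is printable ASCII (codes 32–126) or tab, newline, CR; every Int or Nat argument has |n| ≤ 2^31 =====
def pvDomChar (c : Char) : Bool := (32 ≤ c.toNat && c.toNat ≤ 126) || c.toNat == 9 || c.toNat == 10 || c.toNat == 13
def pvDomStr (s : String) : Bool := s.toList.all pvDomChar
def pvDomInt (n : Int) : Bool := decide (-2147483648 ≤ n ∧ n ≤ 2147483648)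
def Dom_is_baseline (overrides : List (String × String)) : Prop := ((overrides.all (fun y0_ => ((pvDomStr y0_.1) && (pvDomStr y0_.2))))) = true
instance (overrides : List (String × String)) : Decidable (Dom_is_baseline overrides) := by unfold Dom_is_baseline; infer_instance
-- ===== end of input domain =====

-- B replaces A's two-stage check (materialize a filtered delta dict, test it, then loop over the
-- locked keys with get) by one set equality of the non-ignored override pairs against the locked
-- items (idiomatic; same cost).

-- ===== PORT A =====
def pvLockedA : PySem.Dict String String := PySem.Dict.mk
  [("QK_GAIN_INIT", "5.5"), ("WARMDOWN_FRAC", "0.64"), ("TTT_ENABLED", "1"),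
   ("SLIDING_WINDOW_ENABLED", "1"), ("TTT_EPOCHS", "1"), ("EMA_DECAY", "0.995"),
   ("LOGIT_SOFTCAP", "20")]

def pvIgnoredA : List String :=
  ["SEED", "ITERATIONS", "TIMEOUT_SECS", "MAX_WALLCLOCK_SECONDS", "FAST_SMOKE"]

-- dict comprehension: fold over overrides.items(), inserting the pairs that pass the filter
def knob_delta_from_locked (overrides : List (String × String)) : PySem.Dict String String :=
  overrides.foldl
    (fun d p => if pvLockedA.get? p.1 ≠ some p.2 ∧ p.1 ∉ pvIgnoredA then d.insert p.1 p.2 else d)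
    PySem.Dict.empty

def is_baseline (overrides : List (String × String)) : Bool :=
  let extras := knob_delta_from_locked overrides
  if extras.size ≠ 0 then false
  else pvLockedA.items.all (fun p => (PySem.Dict.mk overrides).get? p.1 == some p.2)

-- ===== PORT B =====
def pvIgnoredB : PySem.Set String := PySem.Set.ofList
  ["SEED", "ITERATIONS", "TIMEOUT_SECS", "MAX_WALLCLOCK_SECONDS", "FAST_SMOKE"]

def pvLockedItemsB : List (String × String) :=
  [("QK_GAIN_INIT", "5.5"), ("WARMDOWN_FRAC", "0.64"), ("TTT_ENABLED", "1"),
   ("SLIDING_WINDOW_ENABLED", "1"), ("TTT_EPOCHS", "1"), ("EMA_DECAY", "0.995"),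
   ("LOGIT_SOFTCAP", "20")]

def is_baseline_alt (overrides : List (String × String)) : Bool :=
  PySem.Set.equal
    (PySem.Set.ofList (overrides.filter (fun p => !(PySem.Set.contains pvIgnoredB p.1))))
    (PySem.Set.ofList pvLockedItemsB)

-- ===== PRECONDITION & SPEC =====
def Spec_is_baseline (overrides : List (String × String)) (out : Bool) : Prop := out = is_baseline_alt overrides
instance (overrides : List (String × String)) (out : Bool) : Decidable (Spec_is_baseline overrides out) := by unfold Spec_is_baseline; infer_instance

-- ===== CLAIM (what is proved, stated in full; the proofs are below) =====
def Claim_equal_is_baseline : Prop := ∀ (overrides : List (String × String)), Dom_is_baseline overrides → Spec_is_baseline overrides (is_baseline overrides)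

-- ===== LEMMAS AND PROOFS =====

theorem size_insert_ne_zero (d : PySem.Dict String String) (k v : String) :
    (d.insert k v).size ≠ 0 := by
  rw [PySem.Dict.size_insert]
  split_ifs with h
  · have hk := (PySem.Dict.contains_iff_mem_keys d k).1 h
    intro h0
    simp [PySem.Dict.size] at h0
    simp [PySem.Dict.keys, h0] at hk
  · omega

-- the delta dict is empty iff no override pair passes A's filter
theorem knob_size_zero (l : List (String × String)) (d : PySem.Dict String String) :
    (l.foldl
      (fun d p => if pvLockedA.get? p.1 ≠ some p.2 ∧ p.1 ∉ pvIgnoredA then d.insert p.1 p.2 else d)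
      d).size = 0 ↔
    d.size = 0 ∧ ∀ p ∈ l, pvLockedA.get? p.1 = some p.2 ∨ p.1 ∈ pvIgnoredA := by
  induction l generalizing d with
  | nil => simp
  | cons p t ih =>
    simp only [List.foldl_cons]
    split_ifs with hc
    · rw [ih]
      constructor
      · rintro ⟨h0, -⟩; exact absurd h0 (size_insert_ne_zero d p.1 p.2)
      · rintro ⟨-, hall⟩
        rcases hall p (by simp) with h | h
        exacts [absurd h hc.1, absurd h hc.2]
    · rw [ih]
      constructor
      · rintro ⟨h0, hall⟩
        refine ⟨h0, ?_⟩
        intro q hq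
        rcases List.mem_cons.1 hq with rfl | hq
        · by_cases hv : pvLockedA.get? q.1 = some q.2
          · exact Or.inl hv
          · right; by_contra hmem; exact hc ⟨hv, hmem⟩
        · exact hall q hq
      · rintro ⟨h0, hall⟩
        exact ⟨h0, fun q hq => hall q (by simp [hq])⟩

theorem a_iff (o : List (String × String)) :
    is_baseline o = true ↔
      ((∀ p ∈ o, pvLockedA.get? p.1 = some p.2 ∨ p.1 ∈ pvIgnoredA) ∧
       ∀ p ∈ pvLockedA.items, (PySem.Dict.mk o).get? p.1 = some p.2) := by
  simp only [is_baseline, knob_delta_from_locked]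
  by_cases h : (o.foldl
      (fun d p => if pvLockedA.get? p.1 ≠ some p.2 ∧ p.1 ∉ pvIgnoredA then d.insert p.1 p.2 else d)
      PySem.Dict.empty).size = 0
  · rw [if_neg (by simp [h])]
    rw [knob_size_zero] at h
    rw [List.all_eq_true]
    constructor
    · intro hall; exact ⟨h.2, fun p hp => by simpa using hall p hp⟩
    · rintro ⟨-, h2⟩ p hp; simpa using h2 p hp
  · rw [if_pos (by simpa using h)]
    constructor
    · intro hfalse; simp at hfalse
    · rintro ⟨h1, -⟩
      exact absurd ((knob_size_zero o PySem.Dict.empty).2 ⟨by simp [PySem.Dict.size_empty], h1⟩) h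

theorem b_iff (o : List (String × String)) :
    is_baseline_alt o = true ↔
      ∀ x : String × String, (x ∈ o ∧ x.1 ∉ pvIgnoredA) ↔ x ∈ pvLockedItemsB := by
  simp [is_baseline_alt, PySem.Set.equal_iff, PySem.Set.mem_ofList, List.mem_filter,
    pvIgnoredB, pvIgnoredA]

theorem main_eq (o : List (String × String)) : is_baseline o = is_baseline_alt o := by
  rw [Bool.eq_iff_iff, a_iff, b_iff]
  have hnodup : pvLockedA.keys.Nodup := by decide
  have hdisj : ∀ p ∈ pvLockedItemsB, p.1 ∉ pvIgnoredA := by decide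
  have hitems : pvLockedA.items = pvLockedItemsB := rfl
  constructor
  · rintro ⟨h1, h2⟩ x
    constructor
    · rintro ⟨hxo, hxn⟩
      rcases h1 x hxo with hg | hg
      · have hm := PySem.Dict.mem_items_of_get?_eq_some pvLockedA hg
        rwa [hitems] at hm
      · exact absurd hg hxn
    · intro hx
      have hg := h2 x (by rwa [hitems])
      have hm := PySem.Dict.mem_items_of_get?_eq_some (PySem.Dict.mk o) hg
      exact ⟨hm, hdisj x hx⟩
  · intro hE
    constructor
    · intro p hp
      by_cases hi : p.1 ∈ pvIgnoredA
      · exact Or.inr hi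
      · have hx := (hE p).1 ⟨hp, hi⟩
        rw [← hitems] at hx
        exact Or.inl (PySem.Dict.get?_of_mem_items pvLockedA hx hnodup)
    · intro p hp
      rw [hitems] at hp
      have hpo : p ∈ o := ((hE p).2 hp).1
      have hkey : p.1 ∈ (PySem.Dict.mk o).keys := PySem.Dict.mem_keys_of_mem_items _ hpo
      cases hget : (PySem.Dict.mk o).get? p.1 with
      | none =>
        exact absurd hkey ((PySem.Dict.get?_eq_none_iff_not_mem_keys _ _).1 hget)
      | some v' =>
        have hm : (p.1, v') ∈ o := PySem.Dict.mem_items_of_get?_eq_some _ hget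
        have hin : (p.1, v') ∈ pvLockedItemsB := (hE (p.1, v')).1 ⟨hm, hdisj p hp⟩
        rw [← hitems] at hin hp
        have e1 := PySem.Dict.get?_of_mem_items pvLockedA hin hnodup
        have e2 := PySem.Dict.get?_of_mem_items pvLockedA (k := p.1) (v := p.2) hp hnodup
        rw [e1] at e2
        rw [e2]

-- ===== VERDICT (by name: the statement is the Claim_ definition above) =====
theorem is_baseline_spec : Claim_equal_is_baseline := by
  intro o _
  exact main_eq o
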